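-- pv_equiv track=rewrite | github.com/visheshsinha/dsa-python | hashmaps/longestSubarrayEqual012.py | longestArray
-- ===== SOURCE A (Python) =====
-- def longestArray(nums):
--
--     answer = 0
--     cache = {(0, 0): -1}
--     z0 = z1 = z2 = 0
--
--     for i in range(len(nums)):
--         num = nums[i]
--         if num == 0:
--             z0 += 1
--         elif num == 1:
--             z1 += 1
--         else:
--             z2 += 1
--
--         currentKey = (z0-z1, z1-z2)
--
--         if currentKey in cache:
--             answer = max(answer, i - cache[currentKey])
--         else:
--             cache[currentKey] = i
--
--     return answer
-- ===== SOURCE B (Python) =====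
-- def longestArray(nums):
--     n = len(nums)
--     best = 0
--     for i in range(n):
--         c0 = c1 = c2 = 0
--         for j in range(i, n):
--             v = nums[j]
--             if v == 0:
--                 c0 += 1
--             elif v == 1:
--                 c1 += 1
--             else:
--                 c2 += 1
--             if c0 == c1 == c2:
--                 best = max(best, j - i + 1)
--     return best
-- ===== Notes on version B (the rewrite author's own statement) =====
-- stated objective: alternative
-- what changed: Replaces the prefix-difference hash-map trick with a direct nested-loop scan that keeps running counts per window and takes the longest balanced one; no dictionary at all.
import Mathlib
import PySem

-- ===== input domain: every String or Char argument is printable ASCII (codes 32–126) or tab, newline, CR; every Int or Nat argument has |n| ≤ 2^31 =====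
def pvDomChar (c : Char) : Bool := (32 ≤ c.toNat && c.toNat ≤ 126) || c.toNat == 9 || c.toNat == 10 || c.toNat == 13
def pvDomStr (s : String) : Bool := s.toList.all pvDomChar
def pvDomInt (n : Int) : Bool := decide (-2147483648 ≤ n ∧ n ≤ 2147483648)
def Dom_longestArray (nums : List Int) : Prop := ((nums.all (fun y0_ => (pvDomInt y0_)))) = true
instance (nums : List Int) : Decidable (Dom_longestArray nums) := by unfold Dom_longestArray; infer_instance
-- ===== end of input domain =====

-- B replaces A's prefix-difference hash-map trick by a direct nested-loop window scan (same values, no dictionary); alternative decomposition, not faster.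


-- ===== PORT A =====
-- state: (answer, cache, z0, z1, z2)
def aStep (st : Int × PySem.Dict (Int × Int) Int × Int × Int × Int) (p : Int × Int) :
    Int × PySem.Dict (Int × Int) Int × Int × Int × Int :=
  let answer := st.1
  let cache := st.2.1
  let num := p.2
  let t : Int × Int × Int :=
    if num = 0 then (st.2.2.1 + 1, st.2.2.2.1, st.2.2.2.2)
    else if num = 1 then (st.2.2.1, st.2.2.2.1 + 1, st.2.2.2.2)
    else (st.2.2.1, st.2.2.2.1, st.2.2.2.2 + 1)
  let ck := (t.1 - t.2.1, t.2.1 - t.2.2)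
  match cache.get? ck with
  | some v => (max answer (p.1 - v), cache, t)
  | none => (answer, cache.insert ck p.1, t)

def longestArray (nums : List Int) : Int :=
  ((PySem.List.enumerate nums 0).foldl aStep
    (0, PySem.Dict.ofList [(((0 : Int), (0 : Int)), (-1 : Int))], 0, 0, 0)).1

-- ===== PORT B =====
-- inner-loop state: (best, c0, c1, c2)
def bStep (nums : List Int) (i : Int) (st : Int × Int × Int × Int) (j : Int) :
    Int × Int × Int × Int :=
  let v := PySem.List.pyGetD nums j 0
  let c : Int × Int × Int :=
    if v = 0 then (st.2.1 + 1, st.2.2.1, st.2.2.2)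
    else if v = 1 then (st.2.1, st.2.2.1 + 1, st.2.2.2)
    else (st.2.1, st.2.2.1, st.2.2.2 + 1)
  let best := if c.1 = c.2.1 ∧ c.2.1 = c.2.2 then max st.1 (j - i + 1) else st.1
  (best, c)

def longestArray_alt (nums : List Int) : Int :=
  let n : Int := nums.length
  (PySem.List.pyRange 0 n 1).foldl
    (fun best i => ((PySem.List.pyRange i n 1).foldl (bStep nums i) (best, 0, 0, 0)).1) 0

-- ===== PRECONDITION & SPEC =====
def Spec_longestArray (nums : List Int) (out : Int) : Prop := out = longestArray_alt nums
instance (nums : List Int) (out : Int) : Decidable (Spec_longestArray nums out) := by unfold Spec_longestArray; infer_instance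

-- ===== CLAIM (what is proved, stated in full; the proofs are below) =====
def Claim_equal_longestArray : Prop := ∀ (nums : List Int), Dom_longestArray nums → Spec_longestArray nums (longestArray nums)

-- ===== LEMMAS AND PROOFS =====

-- classification of one element onto the count triple (shared shape of both ports' if/elif chain)
def tstep (t : Int × Int × Int) (x : Int) : Int × Int × Int :=
  if x = 0 then (t.1 + 1, t.2.1, t.2.2)
  else if x = 1 then (t.1, t.2.1 + 1, t.2.2)
  else (t.1, t.2.1, t.2.2 + 1)

def trip (l : List Int) : Int × Int × Int := l.foldl tstep (0, 0, 0)

-- the prefix key A hashes on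
def pk (nums : List Int) (m : Nat) : Int × Int :=
  ((trip (nums.take m)).1 - (trip (nums.take m)).2.1,
   (trip (nums.take m)).2.1 - (trip (nums.take m)).2.2)

-- first prefix index with the same key as prefix b
def fstK (nums : List Int) (b : Nat) : Nat := Nat.find (⟨b, rfl⟩ : ∃ p, pk nums p = pk nums b)

-- the common intermediate value: running max over prefixes of (b - first occurrence of key b)
def midFold (nums : List Int) (n : Nat) : Int :=
  (List.range n).foldl (fun ans (m : Nat) => max ans ((m : Int) + 1 - (fstK nums (m + 1) : Int))) 0

lemma fstK_le (nums : List Int) (b : Nat) : fstK nums b ≤ b := Nat.find_le rfl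

lemma pk_fstK (nums : List Int) (b : Nat) : pk nums (fstK nums b) = pk nums b :=
  Nat.find_spec (⟨b, rfl⟩ : ∃ p, pk nums p = pk nums b)

lemma fstK_min (nums : List Int) (b q : Nat) (h : pk nums q = pk nums b) : fstK nums b ≤ q :=
  Nat.find_min' _ h

-- ---- generic fold facts ----

lemma foldl_max_le_iff (l : List Int) (b c : Int) :
    l.foldl max b ≤ c ↔ b ≤ c ∧ ∀ x ∈ l, x ≤ c := by
  induction l generalizing b with
  | nil => simp
  | cons y t ih =>
    simp only [List.foldl_cons, ih, max_le_iff, List.mem_cons]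
    constructor
    · rintro ⟨⟨h1, h2⟩, h3⟩
      exact ⟨h1, fun x hx => hx.elim (fun e => e ▸ h2) (h3 x)⟩
    · rintro ⟨h1, h2⟩
      exact ⟨⟨h1, h2 y (Or.inl rfl)⟩, fun x hx => h2 x (Or.inr hx)⟩

lemma foldl_ifmax_eq (p : Nat → Prop) [DecidablePred p] (f : Nat → Int) (l : List Nat) (b : Int) :
    l.foldl (fun acc k => if p k then max acc (f k) else acc) b
      = List.foldl max b ((l.filter (fun k => decide (p k))).map f) := by
  induction l generalizing b with
  | nil => rfl
  | cons y t ih =>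
    by_cases h : p y <;> simp [h, ih]

lemma foldl_foldlmax_eq (T : Nat → List Int) (l : List Nat) (b : Int) :
    l.foldl (fun acc i => List.foldl max acc (T i)) b = List.foldl max b (l.flatMap T) := by
  induction l generalizing b with
  | nil => rfl
  | cons y t ih => simp [List.foldl_append, ih]

-- ---- counts / keys ----

lemma trip_append_singleton (l : List Int) (x : Int) :
    trip (l ++ [x]) = tstep (trip l) x := by
  simp [trip, List.foldl_append]

lemma trip_from (l : List Int) (t : Int × Int × Int) :
    l.foldl tstep t = (t.1 + (trip l).1, t.2.1 + (trip l).2.1, t.2.2 + (trip l).2.2) := by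
  induction l generalizing t with
  | nil => simp [trip]
  | cons y r ih =>
    have htrip : trip (y :: r) = r.foldl tstep (tstep (0,0,0) y) := rfl
    rw [List.foldl_cons, ih, htrip, ih]
    simp only [tstep]
    split_ifs <;> simp <;> ring

lemma trip_append (a b : List Int) :
    trip (a ++ b) = ((trip a).1 + (trip b).1, (trip a).2.1 + (trip b).2.1, (trip a).2.2 + (trip b).2.2) := by
  show (a ++ b).foldl tstep (0, 0, 0) = _
  rw [List.foldl_append]
  show b.foldl tstep (trip a) = _
  rw [trip_from]

-- window counts: counts of nums[i:m]
def wtrip (nums : List Int) (i m : Nat) : Int × Int × Int := trip ((nums.take m).drop i)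

lemma wtrip_self (nums : List Int) (i : Nat) : wtrip nums i i = (0, 0, 0) := by
  simp [wtrip, trip]

lemma take_succ_get (nums : List Int) (m : Nat) (h : m < nums.length) :
    nums.take (m + 1) = nums.take m ++ [nums[m]] := by
  rw [List.take_add_one]
  simp [List.getElem?_eq_getElem h]

lemma wtrip_succ (nums : List Int) (i m : Nat) (him : i ≤ m) (h : m < nums.length) :
    wtrip nums i (m + 1) = tstep (wtrip nums i m) nums[m] := by
  unfold wtrip
  rw [take_succ_get nums m h,
      List.drop_append_of_le_length (by simp [List.length_take]; omega)]
  exact trip_append_singleton _ _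

lemma balanced_iff (nums : List Int) (i m : Nat) (him : i ≤ m) :
    ((wtrip nums i m).1 = (wtrip nums i m).2.1 ∧ (wtrip nums i m).2.1 = (wtrip nums i m).2.2)
      ↔ pk nums i = pk nums m := by
  have hsplit : nums.take m = nums.take i ++ (nums.take m).drop i := by
    conv_lhs => rw [← List.take_append_drop i (nums.take m)]
    rw [List.take_take, Nat.min_eq_left him]
  have h := trip_append (nums.take i) ((nums.take m).drop i)
  rw [← hsplit] at h
  unfold pk wtrip
  rw [h]
  simp only [Prod.ext_iff]
  constructor <;> intro hc <;> [skip; skip] <;> omega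


-- ---- B side: the nested pyRange loops compute a fold over Nat ranges of key-equality maxima ----

lemma inner_run (nums : List Int) : ∀ (r i m : Nat) (best : Int), i ≤ m → m + r = nums.length →
    (PySem.List.pyRange (m : Int) (nums.length : Int) 1).foldl (bStep nums (i : Int)) (best, wtrip nums i m)
      = ((List.range r).foldl
          (fun b (k : Nat) => if pk nums i = pk nums (m + k + 1) then max b ((m : Int) + k - i + 1) else b) best,
         wtrip nums i nums.length) := by
  intro r
  induction r with
  | zero =>
    intro i m best him hlen
    have hm : m = nums.length := by omega
    subst hm
    rw [PySem.List.pyRange_one_eq_nil (le_refl _)]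
    simp
  | succ r ih =>
    intro i m best him hlen
    have hm : m < nums.length := by omega
    have hcast : (m : Int) < (nums.length : Int) := by exact_mod_cast hm
    rw [PySem.List.pyRange_one_cons hcast, List.foldl_cons]
    have hv : PySem.List.pyGetD nums (m : Int) 0 = nums[m] := by
      rw [PySem.List.pyGetD_natCast]
      exact List.getD_eq_getElem nums 0 hm
    have hstate : bStep nums (i : Int) (best, wtrip nums i m) ((m : Int))
        = ((if pk nums i = pk nums (m + 1) then max best ((m : Int) - (i : Int) + 1) else best),
           wtrip nums i (m + 1)) := by
      have hc : (if nums[m] = 0 then ((wtrip nums i m).1 + 1, (wtrip nums i m).2.1, (wtrip nums i m).2.2)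
          else if nums[m] = 1 then ((wtrip nums i m).1, (wtrip nums i m).2.1 + 1, (wtrip nums i m).2.2)
          else ((wtrip nums i m).1, (wtrip nums i m).2.1, (wtrip nums i m).2.2 + 1))
          = wtrip nums i (m + 1) := by
        rw [wtrip_succ nums i m him hm]; rfl
      simp only [bStep, hv, hc]
      rw [if_congr (balanced_iff nums i (m + 1) (by omega)) rfl rfl]
    rw [show ((m : Int) + 1) = ((m + 1 : Nat) : Int) by push_cast; ring] at *
    rw [hstate, ih i (m + 1) _ (by omega) (by omega)]
    have hshift : ∀ (b : Int) (k : Nat),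
        (if pk nums i = pk nums (m + (k + 1) + 1) then max b ((m : Int) + (k + 1 : Nat) - i + 1) else b)
          = (if pk nums i = pk nums ((m + 1) + k + 1) then max b (((m + 1 : Nat) : Int) + k - i + 1) else b) := by
      intro b k
      have e1 : m + (k + 1) + 1 = (m + 1) + k + 1 := by omega
      have e2 : (m : Int) + (k + 1 : Nat) - i + 1 = ((m + 1 : Nat) : Int) + k - i + 1 := by push_cast; ring
      rw [e1, e2]
    rw [List.range_succ_eq_map, List.foldl_cons, List.foldl_map]
    simp only [Nat.succ_eq_add_one, hshift]
    congr 2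

lemma B_eq_nested (nums : List Int) :
    longestArray_alt nums
      = (List.range nums.length).foldl
          (fun best (i : Nat) =>
            (List.range (nums.length - i)).foldl
              (fun b (k : Nat) => if pk nums i = pk nums (i + k + 1) then max b ((k : Int) + 1) else b) best) 0 := by
  unfold longestArray_alt
  simp only [PySem.List.pyRange_zero_natCast, List.foldl_map]
  apply PySem.List.foldl_congr_mem
  intro best i hi
  have hi' : i < nums.length := List.mem_range.mp hi
  have h0 : ((best, (0 : Int), (0 : Int), (0 : Int)) : Int × Int × Int × Int) = (best, wtrip nums i i) := by
    rw [wtrip_self]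
  rw [h0, inner_run nums (nums.length - i) i i best (le_refl i) (by omega)]
  apply PySem.List.foldl_congr_mem
  intro b k hk
  have e : (i : Int) + k - i + 1 = (k : Int) + 1 := by ring
  rw [e]

-- ---- the max over all balanced windows equals the max over (prefix, first equal-key prefix) gaps ----

lemma nested_eq_mid (nums : List Int) :
    (List.range nums.length).foldl
        (fun best (i : Nat) =>
          (List.range (nums.length - i)).foldl
            (fun b (k : Nat) => if pk nums i = pk nums (i + k + 1) then max b ((k : Int) + 1) else b) best) 0
      = midFold nums nums.length := by
  have hinner : ∀ (b : Int) (i : Nat),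
      (List.range (nums.length - i)).foldl
          (fun b (k : Nat) => if pk nums i = pk nums (i + k + 1) then max b ((k : Int) + 1) else b) b
        = List.foldl max b
            (((List.range (nums.length - i)).filter
                (fun k => decide (pk nums i = pk nums (i + k + 1)))).map (fun (k : Nat) => (k : Int) + 1)) := by
    intro b i
    exact foldl_ifmax_eq (fun k => pk nums i = pk nums (i + k + 1)) (fun k => (k : Int) + 1) _ b
  simp only [hinner]
  rw [foldl_foldlmax_eq]
  have hmid : midFold nums nums.length
      = List.foldl max 0 ((List.range nums.length).map
          (fun (m : Nat) => (m : Int) + 1 - (fstK nums (m + 1) : Int))) := by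
    rw [List.foldl_map]; rfl
  rw [hmid]
  apply le_antisymm
  · rw [foldl_max_le_iff]
    refine ⟨(PySem.List.le_foldl_max _ _).1, ?_⟩
    intro x hx
    obtain ⟨i, hi, hx⟩ := List.mem_flatMap.mp hx
    obtain ⟨k, hk, rfl⟩ := List.mem_map.mp hx
    obtain ⟨hk1, hk2⟩ := List.mem_filter.mp hk
    have hcond : pk nums i = pk nums (i + k + 1) := of_decide_eq_true hk2
    have hmn : i + k < nums.length := by
      have := List.mem_range.mp hk1
      have := List.mem_range.mp hi
      omega
    have hfle : fstK nums (i + k + 1) ≤ i := fstK_min nums (i + k + 1) i hcond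
    have hmem : ((i + k : Nat) : Int) + 1 - (fstK nums ((i + k) + 1) : Int)
        ∈ (List.range nums.length).map (fun (m : Nat) => (m : Int) + 1 - (fstK nums (m + 1) : Int)) :=
      List.mem_map.mpr ⟨i + k, List.mem_range.mpr hmn, rfl⟩
    refine le_trans ?_ ((PySem.List.le_foldl_max _ _).2 _ hmem)
    push_cast
    omega
  · rw [foldl_max_le_iff]
    refine ⟨(PySem.List.le_foldl_max _ _).1, ?_⟩
    intro x hx
    obtain ⟨m, hm, rfl⟩ := List.mem_map.mp hx
    have hm' : m < nums.length := List.mem_range.mp hm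
    by_cases hp : fstK nums (m + 1) = m + 1
    · have : (m : Int) + 1 - (fstK nums (m + 1) : Int) = 0 := by rw [hp]; push_cast; ring
      rw [this]
      exact (PySem.List.le_foldl_max _ _).1
    · have hple : fstK nums (m + 1) ≤ m := by
        have := fstK_le nums (m + 1); omega
      have hcond : pk nums (fstK nums (m + 1)) = pk nums (fstK nums (m + 1) + (m - fstK nums (m + 1)) + 1) := by
        have e : fstK nums (m + 1) + (m - fstK nums (m + 1)) + 1 = m + 1 := by omega
        rw [e]
        exact pk_fstK nums (m + 1)
      have hmem : (m : Int) + 1 - (fstK nums (m + 1) : Int)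
          ∈ (List.range nums.length).flatMap
              (fun i => ((List.range (nums.length - i)).filter
                  (fun k => decide (pk nums i = pk nums (i + k + 1)))).map (fun (k : Nat) => (k : Int) + 1)) := by
        refine List.mem_flatMap.mpr ⟨fstK nums (m + 1), List.mem_range.mpr (by omega), ?_⟩
        refine List.mem_map.mpr ⟨m - fstK nums (m + 1), ?_, ?_⟩
        · exact List.mem_filter.mpr ⟨List.mem_range.mpr (by omega), decide_eq_true hcond⟩
        · push_cast [Nat.cast_sub hple]
          ring
      exact (PySem.List.le_foldl_max _ _).2 _ hmem

-- ---- A side: the fold state tracks prefix counts, first-occurrence cache, and the running max ----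

def aState (nums : List Int) (m : Nat) : Int × PySem.Dict (Int × Int) Int × Int × Int × Int :=
  (PySem.List.enumerate (nums.take m) 0).foldl aStep
    (0, PySem.Dict.ofList [(((0 : Int), (0 : Int)), (-1 : Int))], 0, 0, 0)

lemma aStep_eq (ans : Int) (cache : PySem.Dict (Int × Int) Int) (c : Int × Int × Int) (i x : Int) :
    aStep (ans, cache, c) (i, x)
      = match cache.get? ((tstep c x).1 - (tstep c x).2.1, (tstep c x).2.1 - (tstep c x).2.2) with
        | some v => (max ans (i - v), cache, tstep c x)
        | none => (ans, cache.insert ((tstep c x).1 - (tstep c x).2.1, (tstep c x).2.1 - (tstep c x).2.2) i, tstep c x) := rfl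

lemma aState_succ (nums : List Int) (m : Nat) (h : m < nums.length) :
    aState nums (m + 1) = aStep (aState nums m) ((m : Int), nums[m]) := by
  unfold aState
  rw [take_succ_get nums m h, PySem.List.enumerate_append, List.foldl_append]
  simp [PySem.List.enumerate_cons, List.length_take, Nat.min_eq_left (le_of_lt h)]

lemma midFold_succ (nums : List Int) (m : Nat) :
    midFold nums (m + 1) = max (midFold nums m) ((m : Int) + 1 - (fstK nums (m + 1) : Int)) := by
  unfold midFold
  rw [List.range_succ, List.foldl_append, List.foldl_cons, List.foldl_nil]

lemma midFold_nonneg (nums : List Int) (m : Nat) : 0 ≤ midFold nums m :=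
  (PySem.List.le_foldl_max_int _ _ _).1

def aInv (nums : List Int) (m : Nat) : Prop :=
  (aState nums m).2.2 = trip (nums.take m)
  ∧ (aState nums m).1 = midFold nums m
  ∧ ∀ (k : Int × Int) (v : Int), (aState nums m).2.1.get? k = some v ↔
      ∃ p, p ≤ m ∧ pk nums p = k ∧ v = (p : Int) - 1 ∧ ∀ q, pk nums q = k → p ≤ q

lemma pk_zero (nums : List Int) : pk nums 0 = (0, 0) := by
  simp [pk, trip]

lemma aInv_holds (nums : List Int) : ∀ m, m ≤ nums.length → aInv nums m := by
  intro m
  induction m with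
  | zero =>
    intro _
    refine ⟨rfl, rfl, ?_⟩
    intro k v
    show (PySem.Dict.ofList [(((0 : Int), (0 : Int)), (-1 : Int))]).get? k = some v ↔ _
    have hofl : PySem.Dict.ofList [(((0 : Int), (0 : Int)), (-1 : Int))]
        = PySem.Dict.mk [(((0 : Int), (0 : Int)), (-1 : Int))] := by decide
    rw [hofl, PySem.Dict.get?_mk_cons]
    constructor
    · intro h
      by_cases hk0 : ((((0 : Int), (0 : Int)) : Int × Int) == k) = true
      · have hkeq : (((0 : Int), (0 : Int)) : Int × Int) = k := by simpa using hk0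
        rw [if_pos hk0] at h
        have hv : v = -1 := by
          injection h with h'
          exact h'.symm
        exact ⟨0, le_refl 0, by rw [pk_zero, ← hkeq], by rw [hv]; ring, fun q _ => Nat.zero_le q⟩
      · rw [if_neg hk0] at h
        simp [PySem.Dict.get?] at h
    · rintro ⟨p, hp0, hpk, hv, -⟩
      have hp : p = 0 := Nat.le_zero.mp hp0
      subst hp
      rw [pk_zero] at hpk
      subst hpk
      have hv' : v = -1 := by omega
      subst hv'
      simp
  | succ m ih =>
    intro hm1
    have hm : m < nums.length := by omega
    obtain ⟨hcnt, hans, hcache⟩ := ih (le_of_lt hm)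
    rcases hst : aState nums m with ⟨ans, cache, c⟩
    rw [hst] at hcnt hans hcache
    simp only at hcnt hans hcache
    have hstep : aState nums (m + 1) = aStep (ans, cache, c) ((m : Int), nums[m]) := by
      rw [aState_succ nums m hm, hst]
    have htc : tstep c nums[m] = trip (nums.take (m + 1)) := by
      rw [hcnt, take_succ_get nums m hm, trip_append_singleton]
    have hck : ((tstep c nums[m]).1 - (tstep c nums[m]).2.1, (tstep c nums[m]).2.1 - (tstep c nums[m]).2.2)
        = pk nums (m + 1) := by
      rw [htc]; rfl
    rw [aStep_eq, hck, htc] at hstep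
    by_cases hc : ∃ v, cache.get? (pk nums (m + 1)) = some v
    · obtain ⟨v, hv⟩ := hc
      obtain ⟨p, hpm, hpk, hveq, hmin⟩ := (hcache _ _).mp hv
      have hfst : fstK nums (m + 1) = p := by
        apply le_antisymm
        · exact fstK_min nums (m + 1) p hpk
        · exact hmin _ (pk_fstK nums (m + 1))
      rw [hv] at hstep
      refine ⟨?_, ?_, ?_⟩
      · rw [hstep]
      · rw [hstep]
        simp only
        rw [hans, midFold_succ, hfst, hveq]
        congr 1
        ring
      · rw [hstep]
        intro k w
        simp only
        rw [hcache]
        constructor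
        · rintro ⟨p', hp', h2, h3, h4⟩
          exact ⟨p', by omega, h2, h3, h4⟩
        · rintro ⟨p', hp', h2, h3, h4⟩
          by_cases hpm' : p' ≤ m
          · exact ⟨p', hpm', h2, h3, h4⟩
          · have hp'' : p' = m + 1 := by omega
            subst hp''
            have := h4 p (hpk.trans h2)
            omega
    · push Not at hc
      have hnone : cache.get? (pk nums (m + 1)) = none := by
        cases hcase : cache.get? (pk nums (m + 1)) with
        | none => rfl
        | some w => exact absurd hcase (hc w)
      have hnoprefix : ∀ q, q ≤ m → pk nums q ≠ pk nums (m + 1) := by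
        intro q hq hqk
        have h1 : fstK nums (m + 1) ≤ q := fstK_min nums (m + 1) q hqk
        have h2 : cache.get? (pk nums (m + 1)) = some ((fstK nums (m + 1) : Int) - 1) := by
          apply (hcache _ _).mpr
          exact ⟨fstK nums (m + 1), by omega, pk_fstK nums (m + 1), rfl,
            fun q' hq' => fstK_min nums (m + 1) q' hq'⟩
        rw [hnone] at h2
        simp at h2
      have hfst : fstK nums (m + 1) = m + 1 := by
        have h1 := fstK_le nums (m + 1)
        rcases Nat.lt_or_ge (fstK nums (m + 1)) (m + 1) with hlt | hge
        · exact absurd (pk_fstK nums (m + 1)) (hnoprefix _ (by omega))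
        · omega
      rw [hnone] at hstep
      refine ⟨?_, ?_, ?_⟩
      · rw [hstep]
      · rw [hstep]
        simp only
        rw [hans, midFold_succ, hfst]
        have : (m : Int) + 1 - ((m + 1 : Nat) : Int) = 0 := by push_cast; ring
        rw [this]
        exact (max_eq_left (midFold_nonneg nums m)).symm
      · rw [hstep]
        intro k w
        simp only
        by_cases hk : k = pk nums (m + 1)
        · subst hk
          rw [PySem.Dict.get?_insert_self]
          constructor
          · intro h
            have hw : w = (m : Int) := by
              injection h with h'
              exact h'.symm
            refine ⟨m + 1, le_refl _, rfl, by rw [hw]; push_cast; ring, ?_⟩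
            intro q hq
            by_contra hlt
            exact hnoprefix q (by omega) hq
          · rintro ⟨p, hp, h2, h3, h4⟩
            have hp' : p = m + 1 := by
              by_contra hne
              exact hnoprefix p (by omega) h2
            subst hp'
            rw [h3]
            congr 1
            push_cast
            ring
        · rw [PySem.Dict.get?_insert_of_ne _ _ hk, hcache]
          constructor
          · rintro ⟨p, hp, h2, h3, h4⟩
            exact ⟨p, by omega, h2, h3, h4⟩
          · rintro ⟨p, hp, h2, h3, h4⟩
            have hp' : p ≤ m := by
              by_contra hgt
              have : p = m + 1 := by omega
              subst this
              exact hk h2.symm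
            exact ⟨p, hp', h2, h3, h4⟩

lemma A_eq_mid (nums : List Int) : longestArray nums = midFold nums nums.length := by
  have h := (aInv_holds nums nums.length (le_refl _)).2.1
  unfold longestArray
  unfold aState at h
  rw [List.take_length] at h
  exact h

theorem longestArray_spec : Claim_equal_longestArray := by
  intro nums _
  unfold Spec_longestArray
  rw [B_eq_nested, nested_eq_mid]
  exact A_eq_mid nums
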